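-- pv_equiv track=rewrite | github.com/amitkmr/coding-questions | Arrays/element_left_side_smaller.py | find_left_side_smaller
-- ===== SOURCE A (Python) =====
-- def find_left_side_smaller(arr,n):
--     if len(arr) == 0:
--         return -1
--     left_max = arr[0]
--     left = []
--     for i in range(1,n-1):
--         if arr[i]>=left_max:
--             left.append(i)
--             left_max = arr[i]
--
--     right_min = arr[n-1]
--     right = []
--     for i in range(1,n-1):
--         if arr[n-1-i] <= right_min:
--             right.append(n-1-i)
--             right_min = arr[n-1-i]
--
--     for i in left:
--         if i in right:
--             return arr[i]
--     return -1
-- ===== SOURCE B (Python) =====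
-- def find_left_side_smaller(arr, n):
--     if len(arr) == 0:
--         return -1
--     if n < 3:
--         return -1
--     prefmax = [arr[0]]
--     for i in range(1, n - 1):
--         prefmax.append(max(prefmax[-1], arr[i]))
--     sufmin = [arr[n - 1]]
--     for i in range(n - 2, 0, -1):
--         sufmin.append(min(sufmin[-1], arr[i]))
--     sufmin.reverse()
--     for i in range(1, n - 1):
--         if prefmax[i - 1] <= arr[i] <= sufmin[i]:
--             return arr[i]
--     return -1
-- ===== Notes on version B (the rewrite author's own statement) =====
-- stated objective: alternative
-- what changed: A collects candidate indices into two lists with running max/min and then intersects them with a quadratic 'i in right' membership scan; B builds explicit prefix-max and suffix-min tables and finds the answer in one forward pass over the middle indices.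
import Mathlib
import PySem

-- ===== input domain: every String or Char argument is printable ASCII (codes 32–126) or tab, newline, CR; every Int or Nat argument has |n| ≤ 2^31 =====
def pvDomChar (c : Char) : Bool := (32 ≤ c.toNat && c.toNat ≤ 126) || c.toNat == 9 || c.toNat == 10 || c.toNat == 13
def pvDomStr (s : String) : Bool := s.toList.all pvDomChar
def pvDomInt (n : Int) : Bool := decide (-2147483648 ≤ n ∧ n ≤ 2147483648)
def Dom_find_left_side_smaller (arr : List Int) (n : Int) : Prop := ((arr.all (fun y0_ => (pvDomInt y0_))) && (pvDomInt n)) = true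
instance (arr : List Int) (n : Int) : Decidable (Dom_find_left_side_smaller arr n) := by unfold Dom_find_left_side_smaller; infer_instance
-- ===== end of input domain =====

-- B (alternative decomposition): instead of A's two conditional-append candidate lists
-- intersected by a list-membership scan, B builds prefix-max / suffix-min tables and does one
-- forward pass over the middle indices. Return values agree on all of Pre_.

-- ===== PORT A =====
-- final loop: 'for i in left: if i in right: return arr[i]' / 'return -1'
def pickA (arr right : List Int) : List Int → Int
  | [] => -1
  | i :: rest => if right.contains i then PySem.List.pyGetD arr i 0 else pickA arr right rest

def find_left_side_smaller (arr : List Int) (n : Int) : Int :=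
  if arr.length = 0 then -1
  else
    let st1 := (PySem.List.pyRange 1 (n-1) 1).foldl
      (fun (st : Int × List Int) i =>
        if PySem.List.pyGetD arr i 0 ≥ st.1 then (PySem.List.pyGetD arr i 0, st.2 ++ [i]) else st)
      (PySem.List.pyGetD arr 0 0, [])
    let st2 := (PySem.List.pyRange 1 (n-1) 1).foldl
      (fun (st : Int × List Int) i =>
        if PySem.List.pyGetD arr (n-1-i) 0 ≤ st.1 then (PySem.List.pyGetD arr (n-1-i) 0, st.2 ++ [n-1-i]) else st)
      (PySem.List.pyGetD arr (n-1) 0, [])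
    pickA arr st2.2 st1.2

-- ===== PORT B =====
-- final loop: 'for i in range(1, n-1): if prefmax[i-1] <= arr[i] <= sufmin[i]: return arr[i]' / 'return -1'
def pickB (arr prefmax sufmin : List Int) : List Int → Int
  | [] => -1
  | i :: rest =>
      if PySem.List.pyGetD prefmax (i-1) 0 ≤ PySem.List.pyGetD arr i 0 ∧
         PySem.List.pyGetD arr i 0 ≤ PySem.List.pyGetD sufmin i 0 then PySem.List.pyGetD arr i 0
      else pickB arr prefmax sufmin rest

def find_left_side_smaller_alt (arr : List Int) (n : Int) : Int :=
  if arr.length = 0 then -1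
  else if n < 3 then -1
  else
    let prefmax := (PySem.List.pyRange 1 (n-1) 1).foldl
      (fun pm i => pm ++ [max (PySem.List.pyGetD pm (-1) 0) (PySem.List.pyGetD arr i 0)])
      [PySem.List.pyGetD arr 0 0]
    let sufmin := ((PySem.List.pyRange (n-2) 0 (-1)).foldl
      (fun sm i => sm ++ [min (PySem.List.pyGetD sm (-1) 0) (PySem.List.pyGetD arr i 0)])
      [PySem.List.pyGetD arr (n-1) 0]).reverse
    pickB arr prefmax sufmin (PySem.List.pyRange 1 (n-1) 1)

-- ===== PRECONDITION & SPEC =====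
-- Pre_ excludes exactly the inputs on which A raises IndexError: a nonempty arr with
-- n > len(arr) (arr[i] or arr[n-1] out of range) or n ≤ -len(arr) (arr[n-1] below -len).
def Pre_find_left_side_smaller (arr : List Int) (n : Int) : Prop :=
  arr = [] ∨ (1 - (arr.length : Int) ≤ n ∧ n ≤ (arr.length : Int))
instance (arr : List Int) (n : Int) : Decidable (Pre_find_left_side_smaller arr n) := by
  unfold Pre_find_left_side_smaller; infer_instance

def pvWitness_find_left_side_smaller : List Int × Int := ([5, 1, 4, 3, 6, 8, 7], 7)

def Spec_find_left_side_smaller (arr : List Int) (n : Int) (out : Int) : Prop := out = find_left_side_smaller_alt arr n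
instance (arr : List Int) (n : Int) (out : Int) : Decidable (Spec_find_left_side_smaller arr n out) := by unfold Spec_find_left_side_smaller; infer_instance

-- ===== CLAIM (what is proved, stated in full; the proofs are below) =====
def Claim_equal_find_left_side_smaller : Prop := ∀ (arr : List Int) (n : Int), Dom_find_left_side_smaller arr n → Pre_find_left_side_smaller arr n → Spec_find_left_side_smaller arr n (find_left_side_smaller arr n)

-- ===== LEMMAS AND PROOFS =====

def pm (arr : List Int) : Nat → Int
  | 0 => arr.getD 0 0
  | k+1 => max (pm arr k) (arr.getD (k+1) 0)

def sm (arr : List Int) (N : Nat) (k : Nat) : Int :=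
  if N ≤ k+1 then arr.getD k 0 else min (arr.getD k 0) (sm arr N (k+1))
  termination_by N - k

def scanIdx (arr : List Int) (N : Nat) : List Nat → Int
  | [] => -1
  | k :: rest =>
      if pm arr (k-1) ≤ arr.getD k 0 ∧ arr.getD k 0 ≤ sm arr N (k+1) then arr.getD k 0
      else scanIdx arr N rest

theorem pickA_scan (arr R : List Int) (N : Nat)
    (hR : ∀ k : Nat, 1 ≤ k → k ≤ N - 2 →
      (R.contains ((k : Nat) : Int) = decide (arr.getD k 0 ≤ sm arr N (k+1)))) :
    ∀ ks : List Nat, (∀ k ∈ ks, 1 ≤ k ∧ k ≤ N - 2) →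
    pickA arr R ((ks.filter (fun k => decide (pm arr (k-1) ≤ arr.getD k 0))).map (fun (k : Nat) => Int.ofNat k))
      = scanIdx arr N ks := by
  intro ks
  induction ks with
  | nil => intro _; simp [pickA, scanIdx]
  | cons k rest ih =>
    intro hb
    have hk := hb k (by simp)
    have hrest : ∀ k ∈ rest, 1 ≤ k ∧ k ≤ N - 2 := fun x hx => hb x (by simp [hx])
    by_cases hL : pm arr (k-1) ≤ arr.getD k 0
    · rw [List.filter_cons_of_pos (by simpa using hL), List.map_cons]
      show (if R.contains ((k : Nat) : Int) then PySem.List.pyGetD arr ((k : Nat) : Int) 0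
            else pickA arr R ((rest.filter (fun k => decide (pm arr (k-1) ≤ arr.getD k 0))).map (fun (k : Nat) => Int.ofNat k))) = _
      rw [hR k hk.1 hk.2]
      by_cases hRc : arr.getD k 0 ≤ sm arr N (k+1)
      · rw [if_pos (by simpa using hRc)]
        simp only [scanIdx]
        rw [if_pos ⟨hL, hRc⟩, PySem.List.pyGetD_natCast]
      · rw [if_neg (by simpa using hRc), ih hrest]
        simp only [scanIdx]
        rw [if_neg (by tauto)]
    · rw [List.filter_cons_of_neg (by simpa using hL), ih hrest]
      simp only [scanIdx]
      rw [if_neg (by tauto)]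

theorem pickB_scan (arr PM SM : List Int) (N : Nat)
    (hPM : ∀ k : Nat, 1 ≤ k → k ≤ N - 2 → PySem.List.pyGetD PM ((k : Int) - 1) 0 = pm arr (k-1))
    (hSM : ∀ k : Nat, 1 ≤ k → k ≤ N - 2 → PySem.List.pyGetD SM (k : Int) 0 = sm arr N (k+1)) :
    ∀ ks : List Nat, (∀ k ∈ ks, 1 ≤ k ∧ k ≤ N - 2) →
    pickB arr PM SM (ks.map (fun (k : Nat) => Int.ofNat k)) = scanIdx arr N ks := by
  intro ks
  induction ks with
  | nil => intro _; simp [pickB, scanIdx]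
  | cons k rest ih =>
    intro hb
    have hk := hb k (by simp)
    have hrest : ∀ k ∈ rest, 1 ≤ k ∧ k ≤ N - 2 := fun x hx => hb x (by simp [hx])
    rw [List.map_cons]
    show (if PySem.List.pyGetD PM (((k : Nat) : Int)-1) 0 ≤ PySem.List.pyGetD arr ((k : Nat) : Int) 0 ∧
             PySem.List.pyGetD arr ((k : Nat) : Int) 0 ≤ PySem.List.pyGetD SM ((k : Nat) : Int) 0
          then PySem.List.pyGetD arr ((k : Nat) : Int) 0
          else pickB arr PM SM (rest.map (fun (k : Nat) => Int.ofNat k))) = _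
    rw [hPM k hk.1 hk.2, hSM k hk.1 hk.2, ih hrest, PySem.List.pyGetD_natCast]
    simp only [scanIdx]

theorem lemL (arr : List Int) : ∀ m : Nat,
    (PySem.List.pyRange 1 (1+(m:Int)) 1).foldl
      (fun (st : Int × List Int) i =>
        if PySem.List.pyGetD arr i 0 ≥ st.1 then (PySem.List.pyGetD arr i 0, st.2 ++ [i]) else st)
      (arr.getD 0 0, [])
    = (pm arr m,
       (((List.range m).map (fun j => j+1)).filter
          (fun k => decide (pm arr (k-1) ≤ arr.getD k 0))).map (fun (k : Nat) => Int.ofNat k)) := by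
  intro m
  induction m with
  | zero => simp [PySem.List.pyRange_one_eq_nil, pm]
  | succ m ih =>
    have hcast : (1 + ((m+1 : Nat) : Int)) = (1 + (m : Int)) + 1 := by push_cast; ring
    rw [hcast, PySem.List.pyRange_one_succ_right (by omega), List.foldl_append]
    rw [ih]
    simp only [List.foldl_cons, List.foldl_nil]
    have hidx : (1 + (m : Int)) = ((m+1 : Nat) : Int) := by push_cast; ring
    rw [hidx, PySem.List.pyGetD_natCast]
    rw [List.range_succ, List.map_append, List.filter_append]
    by_cases hc : pm arr m ≤ arr.getD (m+1) 0
    · rw [if_pos (show arr.getD (m+1) 0 ≥ pm arr m from hc)]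
      have hpm : pm arr (m+1) = arr.getD (m+1) 0 := max_eq_right hc
      have hmap : List.map (fun j => j + 1) [m] = [m+1] := rfl
      rw [hmap, List.filter_cons_of_pos (by simpa using hc), List.filter_nil, hpm]
      simp
    · rw [if_neg (show ¬ arr.getD (m+1) 0 ≥ pm arr m from hc)]
      have hpm : pm arr (m+1) = pm arr m := max_eq_left (le_of_not_ge hc)
      have hmap : List.map (fun j => j + 1) [m] = [m+1] := rfl
      rw [hmap, List.filter_cons_of_neg (by simpa using lt_of_not_ge hc), List.filter_nil, hpm]
      simp

theorem lemR (arr : List Int) (N : Nat) (hN : 3 ≤ N) : ∀ m : Nat, m ≤ N - 2 →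
    (PySem.List.pyRange 1 (1+(m:Int)) 1).foldl
      (fun (st : Int × List Int) i =>
        if PySem.List.pyGetD arr ((N:Int)-1-i) 0 ≤ st.1
        then (PySem.List.pyGetD arr ((N:Int)-1-i) 0, st.2 ++ [(N:Int)-1-i]) else st)
      (arr.getD (N-1) 0, [])
    = (sm arr N (N-1-m),
       (((List.range m).map (fun j => N-2-j)).filter
          (fun k => decide (arr.getD k 0 ≤ sm arr N (k+1)))).map (fun (k : Nat) => Int.ofNat k)) := by
  intro m
  induction m with
  | zero =>
    intro _
    rw [PySem.List.pyRange_one_eq_nil (by omega)]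
    rw [sm, if_pos (by omega)]
    simp
  | succ m ih =>
    intro hm
    have hcast : (1 + ((m+1 : Nat) : Int)) = (1 + (m : Int)) + 1 := by push_cast; ring
    rw [hcast, PySem.List.pyRange_one_succ_right (by omega), List.foldl_append, ih (by omega)]
    simp only [List.foldl_cons, List.foldl_nil]
    have hidx : (N:Int)-1-(1 + (m : Int)) = ((N-2-m : Nat) : Int) := by omega
    rw [hidx, PySem.List.pyGetD_natCast]
    have hnat : N-2-m+1 = N-1-m := by omega
    have hsm : sm arr N (N-2-m) = min (arr.getD (N-2-m) 0) (sm arr N (N-1-m)) := by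
      rw [sm, if_neg (by omega), hnat]
    have htgt : N-1-(m+1) = N-2-m := by omega
    rw [List.range_succ, List.map_append, List.filter_append, htgt]
    have hmap : List.map (fun j => N-2-j) [m] = [N-2-m] := rfl
    rw [hmap]
    by_cases hc : arr.getD (N-2-m) 0 ≤ sm arr N (N-1-m)
    · rw [if_pos hc, List.filter_cons_of_pos (by simpa [hnat] using hc), List.filter_nil]
      rw [hsm, min_eq_left hc]
      simp
    · rw [if_neg hc, List.filter_cons_of_neg (by simpa [hnat] using lt_of_not_ge hc), List.filter_nil]
      rw [hsm, min_eq_right (le_of_lt (lt_of_not_ge hc))]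
      simp

theorem lemPM (arr : List Int) : ∀ m : Nat,
    (PySem.List.pyRange 1 (1+(m:Int)) 1).foldl
      (fun pmL i => pmL ++ [max (PySem.List.pyGetD pmL (-1) 0) (PySem.List.pyGetD arr i 0)])
      [arr.getD 0 0]
    = (List.range (m+1)).map (pm arr) := by
  intro m
  induction m with
  | zero => simp [PySem.List.pyRange_one_eq_nil, pm]
  | succ m ih =>
    have hcast : (1 + ((m+1 : Nat) : Int)) = (1 + (m : Int)) + 1 := by push_cast; ring
    rw [hcast, PySem.List.pyRange_one_succ_right (by omega), List.foldl_append, ih]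
    simp only [List.foldl_cons, List.foldl_nil]
    have hlast : PySem.List.pyGetD ((List.range (m+1)).map (pm arr)) (-1) 0 = pm arr m := by
      rw [List.range_succ, List.map_append]
      exact PySem.List.pyGetD_neg_one_append_singleton _ _ _
    have hidx : (1 + (m : Int)) = ((m+1 : Nat) : Int) := by push_cast; ring
    rw [hlast, hidx, PySem.List.pyGetD_natCast]
    conv_rhs => rw [List.range_succ, List.map_append]
    rfl

theorem lemSM (arr : List Int) (N : Nat) (hN : 3 ≤ N) : ∀ m : Nat, m ≤ N - 2 →
    ((List.range m).map (fun (k : Nat) => ((N:Int)-2) - (k:Int))).foldl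
      (fun smL i => smL ++ [min (PySem.List.pyGetD smL (-1) 0) (PySem.List.pyGetD arr i 0)])
      [arr.getD (N-1) 0]
    = (List.range (m+1)).map (fun j => sm arr N (N-1-j)) := by
  intro m
  induction m with
  | zero =>
    intro _
    have h0 : sm arr N (N-1) = arr.getD (N-1) 0 := by rw [sm, if_pos (by omega)]
    simp [h0]
  | succ m ih =>
    intro hm
    rw [List.range_succ (n := m), List.map_append, List.foldl_append, ih (by omega)]
    simp only [List.map_cons, List.map_nil, List.foldl_cons, List.foldl_nil]
    have hlast : PySem.List.pyGetD ((List.range (m+1)).map (fun j => sm arr N (N-1-j))) (-1) 0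
        = sm arr N (N-1-m) := by
      rw [List.range_succ, List.map_append]
      exact PySem.List.pyGetD_neg_one_append_singleton _ _ _
    have hidx : ((N:Int)-2) - (m:Int) = ((N-2-m : Nat) : Int) := by omega
    rw [hlast, hidx, PySem.List.pyGetD_natCast]
    have hsm : sm arr N (N-2-m) = min (arr.getD (N-2-m) 0) (sm arr N (N-1-m)) := by
      have he : N-2-m+1 = N-1-m := by omega
      rw [sm, if_neg (by omega), he]
    have hmin : min (sm arr N (N-1-m)) (arr.getD (N-2-m) 0) = sm arr N (N-1-(m+1)) := by
      rw [min_comm, ← hsm]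
      congr 1
      omega
    rw [hmin]
    conv_rhs => rw [List.range_succ, List.map_append]
    rfl

theorem getPM (arr : List Int) (N : Nat) (k : Nat) (h1 : 1 ≤ k) (h2 : k ≤ N-2) :
    PySem.List.pyGetD ((List.range (N-1)).map (pm arr)) ((k : Int) - 1) 0 = pm arr (k-1) := by
  have hc : ((k : Int) - 1) = ((k-1 : Nat) : Int) := by omega
  rw [hc, PySem.List.pyGetD_natCast]
  have hk : k-1 < N-1 := by omega
  rw [List.getD_eq_getElem?_getD, List.getElem?_map, List.getElem?_range hk]
  rfl

theorem getSM (arr : List Int) (N : Nat) (k : Nat) (h1 : 1 ≤ k) (h2 : k ≤ N-2) (hN : 3 ≤ N) :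
    PySem.List.pyGetD (((List.range (N-1)).map (fun j => sm arr N (N-1-j))).reverse) (k : Int) 0
      = sm arr N (k+1) := by
  rw [PySem.List.pyGetD_natCast, List.getD_eq_getElem?_getD]
  have hk : k < N-1 := by omega
  rw [List.getElem?_eq_getElem (by simpa using hk)]
  simp only [Option.getD_some, List.getElem_reverse, List.getElem_map, List.getElem_range,
    List.length_map, List.length_range]
  congr 1
  omega

theorem containsR (arr : List Int) (N : Nat) (k : Nat) (h1 : 1 ≤ k) (h2 : k ≤ N-2) :
    ((((List.range (N-2)).map (fun j => N-2-j)).filter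
        (fun k => decide (arr.getD k 0 ≤ sm arr N (k+1)))).map (fun (k : Nat) => Int.ofNat k)).contains
      ((k : Nat) : Int)
      = decide (arr.getD k 0 ≤ sm arr N (k+1)) := by
  have hmem : (((k : Nat) : Int) ∈ (((List.range (N-2)).map (fun j => N-2-j)).filter
        (fun k => decide (arr.getD k 0 ≤ sm arr N (k+1)))).map (fun (k : Nat) => Int.ofNat k))
      ↔ arr.getD k 0 ≤ sm arr N (k+1) := by
    simp only [List.mem_map, List.mem_filter, List.mem_range, Int.ofNat_eq_natCast, Nat.cast_inj]
    constructor
    · rintro ⟨k', ⟨hk', hcond⟩, rfl⟩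
      simpa using hcond
    · intro hcond
      exact ⟨k, ⟨⟨N-2-k, by omega, by omega⟩, by simpa using hcond⟩, rfl⟩
  by_cases hc : arr.getD k 0 ≤ sm arr N (k+1)
  · simp only [hc, decide_true, List.contains_iff_mem]
    exact hmem.mpr hc
  · simp only [hc, decide_false]
    rw [Bool.eq_false_iff]
    intro h
    rw [List.contains_iff_mem] at h
    exact hc (hmem.mp h)

theorem lemL' (arr : List Int) (N : Nat) (hN : 3 ≤ N) :
    (PySem.List.pyRange 1 ((N:Int)-1) 1).foldl
      (fun (st : Int × List Int) i =>
        if PySem.List.pyGetD arr i 0 ≥ st.1 then (PySem.List.pyGetD arr i 0, st.2 ++ [i]) else st)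
      (PySem.List.pyGetD arr 0 0, [])
    = (pm arr (N-2),
       (((List.range (N-2)).map (fun j => j+1)).filter
          (fun k => decide (pm arr (k-1) ≤ arr.getD k 0))).map (fun (k : Nat) => Int.ofNat k)) := by
  have h0 : PySem.List.pyGetD arr 0 0 = arr.getD 0 0 := PySem.List.pyGetD_zero _ _
  have hr : PySem.List.pyRange 1 ((N:Int)-1) 1 = PySem.List.pyRange 1 (1 + ((N-2 : Nat) : Int)) 1 := by
    rw [show ((N:Int)-1) = 1 + ((N-2 : Nat) : Int) from by omega]
  rw [h0, hr]
  exact lemL arr (N-2)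

theorem lemR' (arr : List Int) (N : Nat) (hN : 3 ≤ N) :
    (PySem.List.pyRange 1 ((N:Int)-1) 1).foldl
      (fun (st : Int × List Int) i =>
        if PySem.List.pyGetD arr ((N:Int)-1-i) 0 ≤ st.1
        then (PySem.List.pyGetD arr ((N:Int)-1-i) 0, st.2 ++ [(N:Int)-1-i]) else st)
      (PySem.List.pyGetD arr ((N:Int)-1) 0, [])
    = (sm arr N (N-1-(N-2)),
       (((List.range (N-2)).map (fun j => N-2-j)).filter
          (fun k => decide (arr.getD k 0 ≤ sm arr N (k+1)))).map (fun (k : Nat) => Int.ofNat k)) := by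
  have h0 : PySem.List.pyGetD arr ((N:Int)-1) 0 = arr.getD (N-1) 0 := by
    rw [show ((N:Int)-1) = ((N-1 : Nat) : Int) from by omega, PySem.List.pyGetD_natCast]
  have hr : PySem.List.pyRange 1 ((N:Int)-1) 1 = PySem.List.pyRange 1 (1 + ((N-2 : Nat) : Int)) 1 := by
    rw [show ((N:Int)-1) = 1 + ((N-2 : Nat) : Int) from by omega]
  rw [h0, hr]
  exact lemR arr N hN (N-2) le_rfl

theorem lemPM' (arr : List Int) (N : Nat) (hN : 3 ≤ N) :
    (PySem.List.pyRange 1 ((N:Int)-1) 1).foldl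
      (fun pmL i => pmL ++ [max (PySem.List.pyGetD pmL (-1) 0) (PySem.List.pyGetD arr i 0)])
      [PySem.List.pyGetD arr 0 0]
    = (List.range (N-1)).map (pm arr) := by
  have h0 : PySem.List.pyGetD arr 0 0 = arr.getD 0 0 := PySem.List.pyGetD_zero _ _
  have hr : PySem.List.pyRange 1 ((N:Int)-1) 1 = PySem.List.pyRange 1 (1 + ((N-2 : Nat) : Int)) 1 := by
    rw [show ((N:Int)-1) = 1 + ((N-2 : Nat) : Int) from by omega]
  rw [h0, hr, lemPM arr (N-2)]
  have he : N-2+1 = N-1 := by omega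
  rw [he]

theorem lemSM' (arr : List Int) (N : Nat) (hN : 3 ≤ N) :
    (PySem.List.pyRange ((N:Int)-2) 0 (-1)).foldl
      (fun smL i => smL ++ [min (PySem.List.pyGetD smL (-1) 0) (PySem.List.pyGetD arr i 0)])
      [PySem.List.pyGetD arr ((N:Int)-1) 0]
    = (List.range (N-1)).map (fun j => sm arr N (N-1-j)) := by
  have h0 : PySem.List.pyGetD arr ((N:Int)-1) 0 = arr.getD (N-1) 0 := by
    rw [show ((N:Int)-1) = ((N-1 : Nat) : Int) from by omega, PySem.List.pyGetD_natCast]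
  have hr : PySem.List.pyRange ((N:Int)-2) 0 (-1)
      = (List.range (N-2)).map (fun (k : Nat) => ((N:Int)-2) - (k:Int)) := by
    rw [PySem.List.pyRange_neg_one]
    have : (((N:Int)-2) - 0).toNat = N-2 := by omega
    rw [this]
  rw [h0, hr, lemSM arr N hN (N-2) le_rfl]
  have he : N-2+1 = N-1 := by omega
  rw [he]

theorem main_eq (arr : List Int) (n : Int)
    (hpre : arr = [] ∨ (1 - (arr.length : Int) ≤ n ∧ n ≤ (arr.length : Int))) :
    find_left_side_smaller arr n = find_left_side_smaller_alt arr n := by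
  by_cases h0 : arr.length = 0
  · simp [find_left_side_smaller, find_left_side_smaller_alt, h0]
  by_cases hn3 : n < 3
  · have hr : PySem.List.pyRange 1 (n-1) 1 = [] := PySem.List.pyRange_one_eq_nil (by omega)
    simp [find_left_side_smaller, find_left_side_smaller_alt, h0, hn3, hr, pickA]
  · have hlen : n ≤ (arr.length : Int) := by
      rcases hpre with h | ⟨_, h⟩
      · exact absurd (by simp [h]) h0
      · exact h
    have hn : n = ((n.toNat : Nat) : Int) := (Int.toNat_of_nonneg (by omega)).symm
    set N := n.toNat with hNdef
    have hN3 : 3 ≤ N := by omega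
    rw [hn]
    simp only [find_left_side_smaller, find_left_side_smaller_alt]
    rw [if_neg h0, if_neg h0, if_neg (show ¬ ((N:Int) < 3) by omega)]
    rw [lemL' arr N hN3, lemR' arr N hN3, lemPM' arr N hN3, lemSM' arr N hN3]
    dsimp only
    have hlist : PySem.List.pyRange 1 ((N:Int)-1) 1
        = ((List.range (N-2)).map (fun j => j+1)).map (fun (k : Nat) => Int.ofNat k) := by
      rw [PySem.List.pyRange_one]
      rw [show (((N:Int)-1) - 1).toNat = N-2 from by omega, List.map_map]
      apply List.map_congr_left
      intro j hj
      simp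
      omega
    rw [hlist]
    have hks : ∀ k ∈ (List.range (N-2)).map (fun j => j+1), 1 ≤ k ∧ k ≤ N-2 := by
      intro k hk
      simp only [List.mem_map, List.mem_range] at hk
      omega
    rw [pickA_scan arr _ N (fun k hk1 hk2 => containsR arr N k hk1 hk2) _ hks,
        pickB_scan arr _ _ N (fun k hk1 hk2 => getPM arr N k hk1 hk2)
          (fun k hk1 hk2 => getSM arr N k hk1 hk2 hN3) _ hks]

-- ===== VERDICT (by name: the statement is the Claim_ definition above) =====
theorem find_left_side_smaller_spec : Claim_equal_find_left_side_smaller := by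
  intro arr n _ hpre
  unfold Spec_find_left_side_smaller
  exact main_eq arr n hpre
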